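-- pv_equiv track=rewrite | github.com/sinescode/tracesla | pricetier_changer.py | get_tier_for_ok
-- ===== SOURCE A (Python) =====
-- def get_tier_for_ok(tier_ids, tier_defs, total_ok):
--     tier_map = {t["id"]: t for t in tier_defs}
--     for tid in tier_ids:
--         tier = tier_map.get(tid)
--         if tier and tier["min_ok"] <= total_ok <= tier["max_ok"]:
--             return tier
--     for tid in tier_ids:
--         if tid in tier_map:
--             return tier_map[tid]
--     return None
-- ===== SOURCE B (Python) =====
-- _MISSING = object()
--
--
-- def get_tier_for_ok(tier_ids, tier_defs, total_ok):
--     # Single pass: remember the first existing tier with a sentinel,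
--     # return immediately on the first in-range tier.
--     tier_map = {t["id"]: t for t in tier_defs}
--     first_existing = _MISSING
--     for tid in tier_ids:
--         tier = tier_map.get(tid, _MISSING)
--         if tier is _MISSING:
--             continue
--         if first_existing is _MISSING:
--             first_existing = tier
--         if tier and tier["min_ok"] <= total_ok <= tier["max_ok"]:
--             return tier
--     return None if first_existing is _MISSING else first_existing
-- ===== Notes on version B (the rewrite author's own statement) =====
-- stated objective: simpler
-- what changed: Replaces A's two sequential scans of tier_ids with a single pass that returns the first in-range tier immediately and keeps the first existing tier in a sentinel-initialised variable as the fallback.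
import Mathlib
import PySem

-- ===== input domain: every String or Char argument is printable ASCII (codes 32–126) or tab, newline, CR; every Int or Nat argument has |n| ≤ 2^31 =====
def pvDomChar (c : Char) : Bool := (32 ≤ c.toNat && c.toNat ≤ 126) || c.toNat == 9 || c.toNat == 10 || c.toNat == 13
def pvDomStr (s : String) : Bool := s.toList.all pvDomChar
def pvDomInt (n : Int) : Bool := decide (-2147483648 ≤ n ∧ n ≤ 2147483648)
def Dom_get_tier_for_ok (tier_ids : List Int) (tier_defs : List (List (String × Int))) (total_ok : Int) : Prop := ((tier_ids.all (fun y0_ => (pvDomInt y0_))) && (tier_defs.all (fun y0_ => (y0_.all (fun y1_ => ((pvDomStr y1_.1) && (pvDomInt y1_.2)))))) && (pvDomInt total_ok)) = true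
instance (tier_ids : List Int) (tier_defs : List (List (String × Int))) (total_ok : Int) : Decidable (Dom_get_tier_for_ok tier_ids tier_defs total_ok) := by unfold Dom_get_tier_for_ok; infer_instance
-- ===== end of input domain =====

-- B collapses A's two scans of tier_ids into one pass with a sentinel for the first existing tier (objective: simpler).

-- ===== PORT A =====
-- t[k] on a tier dict; total here with default 0 — exact under Pre_, which guarantees the key is present
def pvTGet (t : List (String × Int)) (k : String) : Int := (t.lookup k).getD 0

-- tier_map = {t["id"]: t for t in tier_defs}
def pvBuildMap (tier_defs : List (List (String × Int))) : PySem.Dict Int (List (String × Int)) :=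
  tier_defs.foldl (fun m t => m.insert (pvTGet t "id") t) PySem.Dict.empty

-- first for-loop of A: first tier that exists, is truthy and is in range
def pvLoopA1 (m : PySem.Dict Int (List (String × Int))) (total_ok : Int) : List Int → Option (List (String × Int))
  | [] => none
  | tid :: rest =>
    match m.get? tid with
    | some t =>
      if t ≠ [] ∧ pvTGet t "min_ok" ≤ total_ok ∧ total_ok ≤ pvTGet t "max_ok" then some t
      else pvLoopA1 m total_ok rest
    | none => pvLoopA1 m total_ok rest

-- second for-loop of A: first tid present in the map
def pvLoopA2 (m : PySem.Dict Int (List (String × Int))) : List Int → Option (List (String × Int))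
  | [] => none
  | tid :: rest =>
    match m.get? tid with
    | some t => some t
    | none => pvLoopA2 m rest

def get_tier_for_ok (tier_ids : List Int) (tier_defs : List (List (String × Int))) (total_ok : Int) : Option (List (String × Int)) :=
  let m := pvBuildMap tier_defs
  match pvLoopA1 m total_ok tier_ids with
  | some t => some t
  | none => pvLoopA2 m tier_ids

-- ===== PORT B =====
-- single pass; the accumulator is first_existing (none = the _MISSING sentinel)
def pvLoopB (m : PySem.Dict Int (List (String × Int))) (total_ok : Int) : List Int → Option (List (String × Int)) → Option (List (String × Int))
  | [], fe => fe
  | tid :: rest, fe =>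
    match m.get? tid with
    | none => pvLoopB m total_ok rest fe
    | some t =>
      let fe' := match fe with | none => some t | some x => some x
      if t ≠ [] ∧ pvTGet t "min_ok" ≤ total_ok ∧ total_ok ≤ pvTGet t "max_ok" then some t
      else pvLoopB m total_ok rest fe'

def get_tier_for_ok_alt (tier_ids : List Int) (tier_defs : List (List (String × Int))) (total_ok : Int) : Option (List (String × Int)) :=
  pvLoopB (pvBuildMap tier_defs) total_ok tier_ids none

-- ===== PRECONDITION & SPEC =====
-- Pre_ requires every tier dict to carry "id", and "min_ok"/"max_ok" whenever its id occurs in tier_ids: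
-- A raises KeyError building the map (missing "id") or probing a looked-up non-empty tier (missing
-- "min_ok"/"max_ok"). Slightly narrower than A's raises: a tier shadowed by a later complete one with the
-- same id, or only reached after an earlier tier already returned, does not make A raise (see cites).
def Pre_get_tier_for_ok (tier_ids : List Int) (tier_defs : List (List (String × Int))) (_total_ok : Int) : Prop :=
  ∀ t ∈ tier_defs, (t.lookup "id").isSome ∧
    ((t.lookup "id").getD 0 ∈ tier_ids → (t.lookup "min_ok").isSome ∧ (t.lookup "max_ok").isSome)
instance (tier_ids : List Int) (tier_defs : List (List (String × Int))) (total_ok : Int) : Decidable (Pre_get_tier_for_ok tier_ids tier_defs total_ok) := by unfold Pre_get_tier_for_ok; infer_instance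

def pvWitness_get_tier_for_ok : List Int × (List (List (String × Int))) × Int :=
  ([1, 2], [[("id", 1), ("min_ok", 0), ("max_ok", 5)], [("id", 2), ("min_ok", 6), ("max_ok", 9)]], 7)

def Spec_get_tier_for_ok (tier_ids : List Int) (tier_defs : List (List (String × Int))) (total_ok : Int) (out : Option (List (String × Int))) : Prop := out = get_tier_for_ok_alt tier_ids tier_defs total_ok
instance (tier_ids : List Int) (tier_defs : List (List (String × Int))) (total_ok : Int) (out : Option (List (String × Int))) : Decidable (Spec_get_tier_for_ok tier_ids tier_defs total_ok out) := by unfold Spec_get_tier_for_ok; infer_instance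

-- ===== CLAIM (what is proved, stated in full; the proofs are below) =====
def Claim_equal_get_tier_for_ok : Prop := ∀ (tier_ids : List Int) (tier_defs : List (List (String × Int))) (total_ok : Int), Dom_get_tier_for_ok tier_ids tier_defs total_ok → Pre_get_tier_for_ok tier_ids tier_defs total_ok → Spec_get_tier_for_ok tier_ids tier_defs total_ok (get_tier_for_ok tier_ids tier_defs total_ok)

-- ===== LEMMAS AND PROOFS =====
-- B's single pass equals A's two loops with `fe` as the final fallback
lemma pvLoopB_eq (m : PySem.Dict Int (List (String × Int))) (total_ok : Int) :
    ∀ (tids : List Int) (fe : Option (List (String × Int))),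
      pvLoopB m total_ok tids fe =
        match pvLoopA1 m total_ok tids with
        | some r => some r
        | none => match fe with | some x => some x | none => pvLoopA2 m tids := by
  intro tids
  induction tids with
  | nil => intro fe; cases fe <;> simp [pvLoopB, pvLoopA1, pvLoopA2]
  | cons tid rest ih =>
    intro fe
    simp only [pvLoopB, pvLoopA1, pvLoopA2]
    cases h : m.get? tid with
    | none => simpa using ih fe
    | some t =>
      by_cases hc : t ≠ [] ∧ pvTGet t "min_ok" ≤ total_ok ∧ total_ok ≤ pvTGet t "max_ok"
      · simp [hc]
      · simp only [hc, if_false]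
        cases fe with
        | none => simpa using ih (some t)
        | some x => simpa using ih (some x)

-- ===== VERDICT (by name: the statement is the Claim_ definition above) =====
theorem get_tier_for_ok_spec : Claim_equal_get_tier_for_ok := by
  intro tier_ids tier_defs total_ok _dom _pre
  unfold Spec_get_tier_for_ok get_tier_for_ok get_tier_for_ok_alt
  rw [pvLoopB_eq]
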